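-- pv_equiv track=rewrite | github.com/christyheaton/advent2022 | 2015/day03.py | houses_receiving_presents
-- ===== SOURCE A (Python) =====
-- def move(coordinates: tuple, direction: str) -> tuple:
--     """return new coordinates after move"""
--     x_coord = coordinates[0]
--     y_coord = coordinates[1]
--     match direction:
--         case '^':
--             y_coord += 1
--         case 'v':
--             y_coord -= 1
--         case '>':
--             x_coord += 1
--         case '<':
--             x_coord -= 1
--     return x_coord, y_coord
--
-- def houses_receiving_presents(input_data: str) -> list:
--     """calculate record of houses receiving presents"""
--     x_loc = 0
--     y_loc = 0
--     house_record = [(x_loc, y_loc)]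
--     for direction in input_data:
--         x_loc, y_loc = move((x_loc, y_loc), direction)
--         house_record.append((x_loc, y_loc))
--     return house_record
-- ===== SOURCE B (Python) =====
-- def _delta(c: str) -> tuple:
--     """delta for one direction character; unknown characters move nothing"""
--     if c == '^':
--         return (0, 1)
--     if c == 'v':
--         return (0, -1)
--     if c == '>':
--         return (1, 0)
--     if c == '<':
--         return (-1, 0)
--     return (0, 0)
--
-- def houses_receiving_presents(input_data: str) -> list:
--     """calculate record of houses receiving presents.
--     Divide and conquer: the record of s1+s2 is the record of s1 followed by
--     the record of s2 translated by s1's endpoint (positions are prefix sums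
--     of the per-character deltas, so records compose by translation)."""
--     if not input_data:
--         return [(0, 0)]
--     if len(input_data) == 1:
--         return [(0, 0), _delta(input_data)]
--     mid = len(input_data) // 2
--     left = houses_receiving_presents(input_data[:mid])
--     ox, oy = left[-1]
--     right = houses_receiving_presents(input_data[mid:])
--     return left + [(x + ox, y + oy) for x, y in right[1:]]
-- ===== Notes on version B (the rewrite author's own statement) =====
-- stated objective: alternative
-- what changed: Replaces the single accumulator loop (move helper + append) by a divide-and-conquer recursion: split the string in half, compute each half's record recursively, and translate the right half's record by the left half's endpoint before concatenating.
import Mathlib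
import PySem

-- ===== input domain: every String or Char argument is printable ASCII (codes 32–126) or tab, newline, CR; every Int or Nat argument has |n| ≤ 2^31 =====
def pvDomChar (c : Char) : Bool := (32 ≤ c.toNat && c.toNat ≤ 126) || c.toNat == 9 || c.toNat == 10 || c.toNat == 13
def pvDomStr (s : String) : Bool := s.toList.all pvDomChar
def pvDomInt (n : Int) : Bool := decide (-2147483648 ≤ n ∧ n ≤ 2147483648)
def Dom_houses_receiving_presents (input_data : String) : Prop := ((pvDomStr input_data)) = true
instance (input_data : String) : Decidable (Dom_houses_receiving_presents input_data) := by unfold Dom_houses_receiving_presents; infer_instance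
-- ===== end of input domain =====

-- B replaces the single accumulator loop by a divide-and-conquer recursion on the two
-- halves of the string, translating the right half's record by the left half's
-- endpoint (objective: alternative).

-- ===== PORT A =====
-- helper 'move': match on the direction character, default leaves the coordinates
def pvMove (coordinates : Int × Int) (direction : Char) : Int × Int :=
  let x_coord := coordinates.1
  let y_coord := coordinates.2
  if direction = '^' then (x_coord, y_coord + 1)
  else if direction = 'v' then (x_coord, y_coord - 1)
  else if direction = '>' then (x_coord + 1, y_coord)
  else if direction = '<' then (x_coord - 1, y_coord)
  else (x_coord, y_coord)

def houses_receiving_presents (input_data : String) : List (Int × Int) :=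
  let st := input_data.toList.foldl
    (fun (st : (Int × Int) × List (Int × Int)) direction =>
      let p := pvMove st.1 direction
      (p, st.2 ++ [p]))
    ((0, 0), [(0, 0)])
  st.2

-- ===== PORT B =====
-- helper '_delta': if-chain on the direction character, default (0, 0)
def pvDelta (c : Char) : Int × Int :=
  if c = '^' then (0, 1)
  else if c = 'v' then (0, -1)
  else if c = '>' then (1, 0)
  else if c = '<' then (-1, 0)
  else (0, 0)

-- divide and conquer on the list of characters; s[:mid] / s[mid:] are take/drop
-- (exact for 0 ≤ mid ≤ len); left[-1] is getLast! (the recursion never returns [])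
def pvRecB (l : List Char) : List (Int × Int) :=
  match l with
  | [] => [(0, 0)]
  | [c] => [(0, 0), pvDelta c]
  | c1 :: c2 :: t =>
    let mid := (c1 :: c2 :: t).length / 2
    let left := pvRecB ((c1 :: c2 :: t).take mid)
    let o := left.getLast!
    let right := pvRecB ((c1 :: c2 :: t).drop mid)
    left ++ (right.tail.map (fun p => (p.1 + o.1, p.2 + o.2)))
termination_by l.length
decreasing_by
  · simp [List.length_take]; omega
  · simp; omega

def houses_receiving_presents_alt (input_data : String) : List (Int × Int) :=
  pvRecB input_data.toList

-- ===== PRECONDITION & SPEC =====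
def Spec_houses_receiving_presents (input_data : String) (out : List (Int × Int)) : Prop := out = houses_receiving_presents_alt input_data
instance (input_data : String) (out : List (Int × Int)) : Decidable (Spec_houses_receiving_presents input_data out) := by unfold Spec_houses_receiving_presents; infer_instance

-- ===== CLAIM (what is proved, stated in full; the proofs are below) =====
def Claim_equal_houses_receiving_presents : Prop := ∀ (input_data : String), Dom_houses_receiving_presents input_data → Spec_houses_receiving_presents input_data (houses_receiving_presents input_data)

-- ===== LEMMAS AND PROOFS =====

-- reference walk: the positions after each successive move, starting from p (p itself not listed)
def pvWalk (p : Int × Int) : List Char → List (Int × Int)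
  | [] => []
  | c :: t =>
    let q := (p.1 + (pvDelta c).1, p.2 + (pvDelta c).2)
    q :: pvWalk q t

-- endpoint of the walk
def pvEnd (p : Int × Int) : List Char → Int × Int
  | [] => p
  | c :: t => pvEnd (p.1 + (pvDelta c).1, p.2 + (pvDelta c).2) t

lemma pvMove_delta (p : Int × Int) (c : Char) :
    pvMove p c = (p.1 + (pvDelta c).1, p.2 + (pvDelta c).2) := by
  unfold pvMove pvDelta
  split_ifs <;> simp [Prod.ext_iff] <;> omega

lemma pvA_loop (l : List Char) : ∀ (p : Int × Int) (acc : List (Int × Int)),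
    (l.foldl
      (fun (st : (Int × Int) × List (Int × Int)) direction =>
        let p := pvMove st.1 direction
        (p, st.2 ++ [p]))
      (p, acc)).2 = acc ++ pvWalk p l := by
  induction l with
  | nil => simp [pvWalk]
  | cons c t ih =>
    intro p acc
    simp only [List.foldl_cons, pvWalk]
    rw [pvMove_delta, ih]
    simp

lemma pvWalk_append (l1 l2 : List Char) : ∀ p,
    pvWalk p (l1 ++ l2) = pvWalk p l1 ++ pvWalk (pvEnd p l1) l2 := by
  induction l1 with
  | nil => simp [pvWalk, pvEnd]
  | cons c t ih => intro p; simp [pvWalk, pvEnd, ih]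

lemma pvWalk_shift (l : List Char) : ∀ (o : Int × Int),
    pvWalk o l = (pvWalk (0, 0) l).map (fun q => (q.1 + o.1, q.2 + o.2)) := by
  induction l with
  | nil => simp [pvWalk]
  | cons c t ih =>
    intro o
    simp only [pvWalk, List.map_cons]
    rw [ih (o.1 + (pvDelta c).1, o.2 + (pvDelta c).2),
        ih (((0 : Int), (0 : Int)).1 + (pvDelta c).1, ((0 : Int), (0 : Int)).2 + (pvDelta c).2),
        List.map_map]
    refine congrArg₂ List.cons ?_ ?_
    · simp only [Prod.mk.injEq]; constructor <;> ring
    · refine List.map_congr_left (fun q _ => ?_)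
      simp only [Function.comp_apply, Prod.mk.injEq]
      constructor <;> ring

lemma pvGetLastD_walk (l : List Char) : ∀ p,
    (pvWalk p l).getLastD p = pvEnd p l := by
  induction l with
  | nil => intro p; simp [pvWalk, pvEnd]
  | cons c t ih =>
    intro p
    simp only [pvWalk, pvEnd, List.getLastD_cons]
    exact ih _

lemma pvRecB_eq_walk_aux : ∀ (n : Nat) (l : List Char), l.length ≤ n →
    pvRecB l = (0, 0) :: pvWalk (0, 0) l := by
  intro n
  induction n with
  | zero =>
    intro l h
    have : l = [] := List.eq_nil_of_length_eq_zero (Nat.le_zero.mp h)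
    subst this
    simp [pvRecB, pvWalk]
  | succ n ih =>
    intro l h
    match l with
    | [] => simp [pvRecB, pvWalk]
    | [c] => simp [pvRecB, pvWalk]
    | c1 :: c2 :: t =>
      have h1 : ((c1 :: c2 :: t).take ((c1 :: c2 :: t).length / 2)).length ≤ n := by
        simp only [List.length_take, List.length_cons] at *
        omega
      have h2 : ((c1 :: c2 :: t).drop ((c1 :: c2 :: t).length / 2)).length ≤ n := by
        simp only [List.length_drop, List.length_cons] at *
        omega
      simp only [pvRecB]
      rw [ih _ h1, ih _ h2, List.tail_cons, List.getLast!_cons_eq_getLastD,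
          pvGetLastD_walk, ← pvWalk_shift, List.cons_append, ← pvWalk_append,
          List.take_append_drop]

lemma pvRecB_eq_walk (l : List Char) : pvRecB l = (0, 0) :: pvWalk (0, 0) l :=
  pvRecB_eq_walk_aux l.length l (le_refl _)

-- ===== VERDICT (by name: the statement is the Claim_ definition above) =====
theorem houses_receiving_presents_spec : Claim_equal_houses_receiving_presents := by
  intro s _
  unfold Spec_houses_receiving_presents houses_receiving_presents houses_receiving_presents_alt
  rw [pvRecB_eq_walk, pvA_loop]
  simp
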